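-- pv_equiv track=rewrite | github.com/daniel-reich/ubiquitous-fiesta | bfz7kTgPujtfcHR9d_5.py | x_pronounce
-- ===== SOURCE A (Python) =====
-- def x_pronounce(sentence):
--   a = ""
--   k = ""
--   sentence += " "
--   for letter in sentence:
--     if letter != " ":
--       a += letter
--     else:
--       if a == "x":
--         k += "ecks" +" "
--       elif a[0] == "x":
--         k += ("z" + a[1:]) + " "
--       elif a.count("x") > 0:
--         k += (a[:a.index("x")] + "cks" + a[a.index("x")+1:]) + " "
--       else:
--         k += (a + " ")
--       a = ""
--   return k[:-1]
-- ===== SOURCE B (Python) =====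
-- def _say(word):
--     if word == "x":
--         return "ecks"
--     if word[0] == "x":
--         return "z" + word[1:]
--     if "x" in word:
--         i = word.index("x")
--         return word[:i] + "cks" + word[i + 1:]
--     return word
--
--
-- def x_pronounce(sentence):
--     return " ".join(_say(word) for word in sentence.split(" "))
-- ===== Notes on version B (the rewrite author's own statement) =====
-- stated objective: simpler
-- what changed: Replaces A's character-by-character accumulator loop (with a sentinel space appended and the final space sliced off) by split(' ') into words, a per-word helper, and ' '.join.
import Mathlib
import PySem

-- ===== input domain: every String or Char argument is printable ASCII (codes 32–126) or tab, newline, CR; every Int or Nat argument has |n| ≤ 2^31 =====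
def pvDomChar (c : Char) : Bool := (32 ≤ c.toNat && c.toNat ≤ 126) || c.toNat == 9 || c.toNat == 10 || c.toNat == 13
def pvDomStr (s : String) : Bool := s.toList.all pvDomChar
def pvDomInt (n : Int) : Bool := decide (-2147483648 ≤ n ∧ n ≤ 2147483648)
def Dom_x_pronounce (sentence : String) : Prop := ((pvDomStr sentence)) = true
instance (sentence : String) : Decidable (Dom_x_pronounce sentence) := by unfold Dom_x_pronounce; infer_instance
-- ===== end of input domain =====

-- B replaces A's character-by-character accumulator loop by split(' ') / per-word helper / ' '.join (objective: simpler).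

-- ===== PORT A =====
-- loop body of A's `for letter in sentence` (state = (a, k)); a[0] is guarded by Pre_ (IndexError on empty segments)
def xStep (ak : List Char × List Char) (letter : Char) : List Char × List Char :=
  if letter ≠ ' ' then (ak.1 ++ [letter], ak.2)
  else
    let a := ak.1
    let k := ak.2
    let k' :=
      if a = ['x'] then k ++ ("ecks".toList ++ [' '])
      else if (PySem.List.pyGet? a 0).getD ' ' = 'x' then
        k ++ (['z'] ++ PySem.List.slice a (some 1) none) ++ [' ']
      else if PySem.Chars.count a ['x'] > 0 then
        k ++ (PySem.List.slice a none (some (PySem.Chars.find a ['x'])) ++ "cks".toList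
              ++ PySem.List.slice a (some (PySem.Chars.find a ['x'] + 1)) none) ++ [' ']
      else k ++ (a ++ [' '])
    ([], k')

def x_pronounce (sentence : String) : String :=
  String.mk (PySem.List.slice ((sentence.toList ++ [' ']).foldl xStep ([], [])).2 none (some (-1)))

-- ===== PORT B =====
-- port of Source B's _say(word); word[0] guarded by Pre_ as in A
def xSay (word : List Char) : List Char :=
  if word = ['x'] then "ecks".toList
  else if (PySem.List.pyGet? word 0).getD ' ' = 'x' then
    'z' :: PySem.List.slice word (some 1) none
  else if PySem.Chars.isIn ['x'] word then
    PySem.List.slice word none (some (PySem.Chars.find word ['x'])) ++ "cks".toList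
      ++ PySem.List.slice word (some (PySem.Chars.find word ['x'] + 1)) none
  else word

def x_pronounce_alt (sentence : String) : String :=
  String.mk (PySem.Chars.join [' '] ((PySem.Chars.splitOn sentence.toList [' ']).map xSay))

-- ===== PRECONDITION & SPEC =====
-- Pre_ excludes exactly the inputs on which Python A raises IndexError (an empty space-separated
-- segment: empty string, leading/trailing space, or two consecutive spaces); Python B raises there too.
def Pre_x_pronounce (sentence : String) : Prop :=
  sentence.toList ≠ [] ∧ sentence.toList.head? ≠ some ' ' ∧
    sentence.toList.getLast? ≠ some ' ' ∧ ¬ ([' ', ' '] <:+: sentence.toList)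
instance (sentence : String) : Decidable (Pre_x_pronounce sentence) := by
  unfold Pre_x_pronounce; infer_instance

def pvWitness_x_pronounce : String := "xylophone x axe max"

def Spec_x_pronounce (sentence : String) (out : String) : Prop := out = x_pronounce_alt sentence
instance (sentence : String) (out : String) : Decidable (Spec_x_pronounce sentence out) := by unfold Spec_x_pronounce; infer_instance

-- ===== CLAIM (what is proved, stated in full; the proofs are below) =====
def Claim_equal_x_pronounce : Prop := ∀ (sentence : String), Dom_x_pronounce sentence → Pre_x_pronounce sentence → Spec_x_pronounce sentence (x_pronounce sentence)

-- ===== LEMMAS AND PROOFS =====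

-- proof-side model of splitting on a single space
def sp : List Char → List (List Char)
  | [] => [[]]
  | c :: rest => if c = ' ' then [] :: sp rest else (c :: (sp rest).headI) :: (sp rest).tail

-- proof-side model of ' '.join
def jn : List (List Char) → List Char
  | [] => []
  | [w] => w
  | w :: ws => w ++ ' ' :: jn ws

theorem sp_ne_nil (l : List Char) : sp l ≠ [] := by
  cases l <;> simp [sp] <;> split <;> simp

theorem sp_cons (l : List Char) : ∃ w ws, sp l = w :: ws := by
  rcases h : sp l with _ | ⟨w, ws⟩
  · exact absurd h (sp_ne_nil l)
  · exact ⟨w, ws, rfl⟩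

theorem jn_cons_cons (w w' : List Char) (ws : List (List Char)) :
    jn (w :: w' :: ws) = w ++ ' ' :: jn (w' :: ws) := by
  rfl

theorem jn_cons_head (c : Char) (w : List Char) (ws : List (List Char)) :
    jn ((c :: w) :: ws) = c :: jn (w :: ws) := by
  cases ws <;> simp [jn]

theorem jn_sp (l : List Char) : jn (sp l) = l := by
  induction l with
  | nil => rfl
  | cons c rest ih =>
    by_cases hc : c = ' '
    · subst hc
      rcases sp_cons rest with ⟨w, ws, hw⟩
      rw [show sp (' ' :: rest) = [] :: sp rest from by simp [sp]]
      rw [hw, jn_cons_cons, ← hw, ih]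
      simp
    · rcases sp_cons rest with ⟨w, ws, hw⟩
      rw [show sp (c :: rest) = (c :: (sp rest).headI) :: (sp rest).tail from by simp [sp, hc]]
      rw [hw]
      simp only [List.headI, List.tail_cons]
      rw [jn_cons_head, ← hw, ih]

theorem sp_no_space (l : List Char) : ∀ w ∈ sp l, ∀ c ∈ w, c ≠ ' ' := by
  induction l with
  | nil => simp [sp]
  | cons c rest ih =>
    by_cases hc : c = ' '
    · subst hc; simpa [sp] using ih
    · rcases sp_cons rest with ⟨w, ws, hw⟩
      intro v hv d hd
      simp [sp, hc, hw] at hv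
      rcases hv with rfl | hv
      · rcases List.mem_cons.mp hd with rfl | hd
        · exact hc
        · exact ih w (by simp [hw]) d hd
      · exact ih v (by simp [hw, hv]) d hd

-- splitOn with a single-space separator computes sp
theorem splitOn_go_eq_sp (fuel : Nat) (l cur : List Char) (acc : List (List Char))
    (h : l.length < fuel) :
    PySem.Chars.splitOn.go [' '] fuel l cur acc
      = acc.reverse ++ (sp l).modifyHead (cur.reverse ++ ·) := by
  induction fuel generalizing l cur acc with
  | zero => omega
  | succ f ih =>
    cases l with
    | nil => simp [PySem.Chars.splitOn.go, sp]
    | cons c rest =>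
      by_cases hc : c = ' '
      · subst hc
        rcases sp_cons rest with ⟨w, ws, hw⟩
        rw [PySem.Chars.splitOn.go]
        simp only [List.isPrefixOf]
        rw [if_pos (by simp)]
        simp only [List.length_singleton, List.drop_succ_cons, List.drop_zero]
        rw [ih rest [] (cur.reverse :: acc) (by simpa using Nat.lt_of_succ_lt_succ h)]
        rw [show sp (' ' :: rest) = [] :: sp rest from by simp [sp]]
        simp [hw]
      · rcases sp_cons rest with ⟨w, ws, hw⟩
        rw [PySem.Chars.splitOn.go]
        simp only [List.isPrefixOf]
        rw [if_neg (by simp [Ne.symm hc])]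
        rw [ih rest (c :: cur) acc (by simpa using Nat.lt_of_succ_lt_succ h)]
        rw [show sp (c :: rest) = (c :: (sp rest).headI) :: (sp rest).tail from by simp [sp, hc]]
        simp [hw]

theorem splitOn_eq_sp (l : List Char) : PySem.Chars.splitOn l [' '] = sp l := by
  rw [PySem.Chars.splitOn, splitOn_go_eq_sp _ _ _ _ (by omega)]
  rcases sp_cons l with ⟨w, ws, hw⟩
  simp [hw]

-- count with a one-character needle is List.count
theorem count_go_eq (fuel : Nat) (l : List Char) (acc : Nat) (h : l.length ≤ fuel) :
    PySem.Chars.count.go ['x'] fuel l acc = acc + l.count 'x' := by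
  induction fuel generalizing l acc with
  | zero =>
    cases l with
    | nil => simp [PySem.Chars.count.go]
    | cons c rest => simp at h
  | succ f ih =>
    cases l with
    | nil => simp [PySem.Chars.count.go]
    | cons c rest =>
      by_cases hc : c = 'x'
      · subst hc
        rw [PySem.Chars.count.go]
        simp only [List.isPrefixOf]
        rw [if_pos (by simp)]
        simp only [List.length_singleton, List.drop_succ_cons, List.drop_zero]
        rw [ih rest (acc + 1) (by simpa using h)]
        simp [List.count_cons]
        omega
      · rw [PySem.Chars.count.go]
        simp only [List.isPrefixOf]
        rw [if_neg (by simp [Ne.symm hc])]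
        rw [ih rest acc (by simpa using h)]
        simp [List.count_cons, hc]

theorem count_x_eq (l : List Char) : PySem.Chars.count l ['x'] = l.count 'x' := by
  rw [PySem.Chars.count]
  simp [count_go_eq l.length l 0 le_rfl]

theorem count_pos_iff_isIn (l : List Char) :
    (PySem.Chars.count l ['x'] > 0) ↔ PySem.Chars.isIn ['x'] l = true := by
  rw [count_x_eq, PySem.Chars.isIn_iff_infix]
  constructor
  · intro h
    have : 'x' ∈ l := List.count_pos_iff.mp h
    rcases List.mem_iff_append.mp this with ⟨s, t, rfl⟩
    exact ⟨s, t, by simp⟩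
  · rintro ⟨s, t, rfl⟩
    have : 'x' ∈ s ++ ['x'] ++ t := by simp
    exact List.count_pos_iff.mpr this

-- A's else-branch computes exactly xSay
theorem xStep_space (a k : List Char) :
    xStep (a, k) ' ' = ([], k ++ (xSay a ++ [' '])) := by
  simp only [xStep, xSay, if_neg (by simp : ¬(' ' ≠ ' '))]
  by_cases h1 : a = ['x']
  · simp [h1]
  · rw [if_neg h1, if_neg h1]
    by_cases h2 : (PySem.List.pyGet? a 0).getD ' ' = 'x'
    · simp [h2]
    · rw [if_neg h2, if_neg h2]
      by_cases h3 : PySem.Chars.count a ['x'] > 0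
      · rw [if_pos h3, if_pos ((count_pos_iff_isIn a).mp h3)]
        simp
      · rw [if_neg h3, if_neg (fun hc => h3 ((count_pos_iff_isIn a).mpr hc))]

theorem foldl_xStep_word (w : List Char) (hw : ∀ c ∈ w, c ≠ ' ') (a k : List Char) :
    List.foldl xStep (a, k) w = (a ++ w, k) := by
  induction w generalizing a with
  | nil => simp
  | cons c rest ih =>
    have hc : c ≠ ' ' := hw c (by simp)
    simp only [List.foldl_cons]
    rw [show xStep (a, k) c = (a ++ [c], k) by simp [xStep, hc]]
    rw [ih (fun d hd => hw d (by simp [hd])) (a ++ [c])]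
    simp

theorem foldl_xStep_one (w : List Char) (hw : ∀ c ∈ w, c ≠ ' ') (k : List Char) :
    List.foldl xStep ([], k) (w ++ [' ']) = ([], k ++ (xSay w ++ [' '])) := by
  rw [List.foldl_append, foldl_xStep_word w hw [] k]
  simp [xStep_space]

theorem foldl_xStep_words (ws : List (List Char)) (hws : ∀ w ∈ ws, ∀ c ∈ w, c ≠ ' ')
    (hne : ws ≠ []) (k : List Char) :
    List.foldl xStep ([], k) (jn ws ++ [' '])
      = ([], k ++ (ws.map (fun w => xSay w ++ [' '])).flatten) := by
  induction ws generalizing k with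
  | nil => exact absurd rfl hne
  | cons w ws ih =>
    cases ws with
    | nil =>
      simp only [jn]
      rw [foldl_xStep_one w (hws w (by simp)) k]
      simp
    | cons w' ws' =>
      rw [jn_cons_cons]
      rw [show w ++ ' ' :: jn (w' :: ws') ++ [' '] = (w ++ [' ']) ++ (jn (w' :: ws') ++ [' ']) from by simp]
      rw [List.foldl_append, foldl_xStep_one w (hws w (by simp)) k]
      rw [ih (fun v hv => hws v (by simp [hv])) (by simp) (k ++ (xSay w ++ [' ']))]
      simp

theorem dropLast_flatten (ws : List (List Char)) (hne : ws ≠ []) :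
    ((ws.map (fun w => xSay w ++ [' '])).flatten).dropLast = jn (ws.map xSay) := by
  induction ws with
  | nil => exact absurd rfl hne
  | cons w ws ih =>
    cases ws with
    | nil => simp [jn]
    | cons w' ws' =>
      have h2 : ((List.map (fun w => xSay w ++ [' ']) (w' :: ws')).flatten) ≠ [] := by
        simp
      rw [List.map_cons, List.flatten_cons, List.dropLast_append_of_ne_nil h2,
          ih (by simp)]
      simp [jn_cons_cons]

-- ===== VERDICT (by name: the statement is the Claim_ definition above) =====
theorem x_pronounce_spec : Claim_equal_x_pronounce := by
  intro sentence _ hpre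
  unfold Spec_x_pronounce x_pronounce x_pronounce_alt
  rcases hpre with ⟨hnil, hhead, hlast, hdbl⟩
  have hsp := splitOn_eq_sp sentence.toList
  rw [hsp, PySem.Chars.join]
  have hws : ∀ w ∈ sp sentence.toList, ∀ c ∈ w, c ≠ ' ' := sp_no_space _
  have hne : sp sentence.toList ≠ [] := sp_ne_nil _
  have key : (sentence.toList ++ [' ']).foldl xStep ([], [])
      = ([], ((sp sentence.toList).map (fun w => xSay w ++ [' '])).flatten) := by
    conv_lhs => rw [← jn_sp sentence.toList]
    simpa using foldl_xStep_words (sp sentence.toList) hws hne []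
  rw [key]
  have hslice : ∀ (l : List Char), PySem.List.slice l none (some (-1)) = l.dropLast := by
    intro l; simp [pysem]
  rw [hslice, dropLast_flatten _ hne]
  -- jn = intercalate [' ']
  congr 1
  generalize (sp sentence.toList).map xSay = xs
  induction xs with
  | nil => rfl
  | cons x xs ihx =>
    cases xs with
    | nil => simp [jn, List.intercalate]
    | cons y ys =>
      rw [jn_cons_cons, show List.intercalate [' '] (x :: y :: ys) = x ++ [' '] ++ List.intercalate [' '] (y :: ys) from by simp [List.intercalate]]
      rw [ihx]
      simp
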